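-- pv_equiv track=rewrite | github.com/dodieboy/Np_class | Year 1 Sem 1/PROG1_python/Class/Coursemology.py | trinket_logo
-- ===== SOURCE A (Python) =====
-- green = (0, 255, 0)
--
-- white = (255,255,255)
--
-- nothing = (0,0,0)
--
-- def trinket_logo(light_level):
--     G = green
--     W = white
--     O = nothing
--
--
--     logo = []
--
--     for i in range(8):
--         if i == light_level:
--             for k in range(8):
--                 logo.append(G)
--         else:
--             for k in range(8):
--                 logo.append(W)
--     return logo
-- ===== SOURCE B (Python) =====
-- def trinket_logo(light_level):
--     G = (0, 255, 0)
--     W = (255, 255, 255)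
--     if light_level in range(8):
--         i = int(light_level)
--         return [W] * (8 * i) + [G] * 8 + [W] * (8 * (7 - i))
--     return [W] * 64
-- ===== Notes on version B (the rewrite author's own statement) =====
-- stated objective: simpler
-- what changed: Replaces the nested row/column append loops with a closed-form concatenation of three replicated blocks (white prefix, green row, white suffix), or one all-white block when the level is outside 0..7.
import Mathlib
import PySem

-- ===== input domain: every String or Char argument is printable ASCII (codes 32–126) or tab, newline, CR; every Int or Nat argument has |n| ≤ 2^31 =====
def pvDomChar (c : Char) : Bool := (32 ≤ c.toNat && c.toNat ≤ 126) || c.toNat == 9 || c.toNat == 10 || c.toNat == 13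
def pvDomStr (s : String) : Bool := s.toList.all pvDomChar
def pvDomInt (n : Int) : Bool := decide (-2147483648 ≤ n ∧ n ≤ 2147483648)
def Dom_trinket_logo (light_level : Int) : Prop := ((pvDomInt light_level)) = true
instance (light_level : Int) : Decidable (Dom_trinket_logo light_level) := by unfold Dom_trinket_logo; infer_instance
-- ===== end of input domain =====

-- B replaces A's nested append loops by a closed-form concatenation of three replicated blocks (simpler).

-- ===== PORT A =====
-- literal transliteration: outer loop over range(8), inner loops appending the tuple 8 times
def trinket_logo (light_level : Int) : List (List Int) :=
  (PySem.List.pyRange 0 8 1).foldl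
    (fun logo i =>
      if i == light_level then
        (PySem.List.pyRange 0 8 1).foldl (fun l _ => l ++ [[0, 255, 0]]) logo
      else
        (PySem.List.pyRange 0 8 1).foldl (fun l _ => l ++ [[255, 255, 255]]) logo)
    []

-- ===== PORT B =====
def trinket_logo_alt (light_level : Int) : List (List Int) :=
  if 0 ≤ light_level ∧ light_level < 8 then
    List.replicate (8 * light_level.toNat) [255, 255, 255]
      ++ List.replicate 8 [0, 255, 0]
      ++ List.replicate (8 * (7 - light_level.toNat)) [255, 255, 255]
  else
    List.replicate 64 [255, 255, 255]

-- ===== PRECONDITION & SPEC =====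
def Spec_trinket_logo (light_level : Int) (out : List (List Int)) : Prop := out = trinket_logo_alt light_level
instance (light_level : Int) (out : List (List Int)) : Decidable (Spec_trinket_logo light_level out) := by unfold Spec_trinket_logo; infer_instance

-- ===== CLAIM (what is proved, stated in full; the proofs are below) =====
def Claim_equal_trinket_logo : Prop := ∀ (light_level : Int), Dom_trinket_logo light_level → Spec_trinket_logo light_level (trinket_logo light_level)

-- ===== LEMMAS AND PROOFS =====

theorem trinket_logo_out (l : Int) (h : ¬ (0 ≤ l ∧ l < 8)) :
    trinket_logo l = trinket_logo_alt l := by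
  simp only [trinket_logo, trinket_logo_alt, if_neg h, PySem.List.pyRange]
  have h0 : ((0:Int) = l) = False := by simp; omega
  have h1 : ((1:Int) = l) = False := by simp; omega
  have h2 : ((2:Int) = l) = False := by simp; omega
  have h3 : ((3:Int) = l) = False := by simp; omega
  have h4 : ((4:Int) = l) = False := by simp; omega
  have h5 : ((5:Int) = l) = False := by simp; omega
  have h6 : ((6:Int) = l) = False := by simp; omega
  have h7 : ((7:Int) = l) = False := by simp; omega
  norm_num [show Int.toNat 8 = 8 from rfl, List.range_succ, List.foldl, h0, h1, h2, h3, h4, h5, h6, h7, List.replicate]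

-- ===== VERDICT (by name: the statement is the Claim_ definition above) =====
theorem trinket_logo_spec : Claim_equal_trinket_logo := by
  intro l _
  show trinket_logo l = trinket_logo_alt l
  by_cases h : 0 ≤ l ∧ l < 8
  · obtain ⟨h0, h8⟩ := h
    interval_cases l <;> decide
  · exact trinket_logo_out l h
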